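-- pv_equiv track=rewrite | github.com/yanggak12/algorithm-py | codesignal/commonCharacterCount.py | solution
-- ===== SOURCE A (Python) =====
-- def solution(s1, s2):
--     answer = 0
--     s_set = set([])
--     if len(s1) < len(s2):
--         smaller_s = s1
--         larger_s = s2
--     else:
--         smaller_s = s2
--         larger_s = s1
--
--     for w in smaller_s:
--         if larger_s.find(w) >= 0:
--             s_set.add(w)
--     for s in s_set:
--         answer += min(smaller_s.count(s), larger_s.count(s))
--     return answer
-- ===== SOURCE B (Python) =====
-- def solution(s1, s2):
--     a = sorted(s1)
--     b = sorted(s2)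
--     i = j = ans = 0
--     while i < len(a) and j < len(b):
--         if a[i] < b[j]:
--             i += 1
--         elif b[j] < a[i]:
--             j += 1
--         else:
--             ans += 1
--             i += 1
--             j += 1
--     return ans
-- ===== Notes on version B (the rewrite author's own statement) =====
-- stated objective: alternative
-- what changed: Replaces A's set-collection pass with repeated find/count scans by sorting both strings once and counting common characters with a single two-pointer merge over the sorted lists.
import Mathlib
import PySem

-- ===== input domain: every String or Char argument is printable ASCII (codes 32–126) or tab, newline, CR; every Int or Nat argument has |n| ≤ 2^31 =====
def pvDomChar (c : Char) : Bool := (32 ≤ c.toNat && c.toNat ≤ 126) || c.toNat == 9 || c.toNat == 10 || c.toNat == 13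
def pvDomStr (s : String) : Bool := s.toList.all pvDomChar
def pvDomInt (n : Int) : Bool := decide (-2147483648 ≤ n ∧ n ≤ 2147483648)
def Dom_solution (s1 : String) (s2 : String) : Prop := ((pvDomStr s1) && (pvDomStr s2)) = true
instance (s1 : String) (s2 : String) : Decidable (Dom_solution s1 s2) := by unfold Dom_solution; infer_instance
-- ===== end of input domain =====

-- B replaces A's set-collection + find/count scans by sorting both strings and counting with one two-pointer merge; return values agree everywhere.

-- ===== PORT A =====
-- literal transliteration of A: pick smaller/larger by length, collect into a set the
-- characters of the smaller string found in the larger, then sum min(count, count).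
def solution (s1 : String) (s2 : String) : Int :=
  let answer : Int := 0
  let sset : PySem.Set Char := PySem.Set.empty
  let p := if PySem.Str.len s1 < PySem.Str.len s2 then (s1, s2) else (s2, s1)
  let smaller := p.1
  let larger := p.2
  let sset := smaller.toList.foldl
    (fun st w => if PySem.Str.find larger (String.ofList [w]) ≥ 0 then PySem.Set.add st w else st) sset
  sset.foldl
    (fun ans c => ans +
      (↑(min (PySem.Str.count smaller (String.ofList [c])) (PySem.Str.count larger (String.ofList [c]))) : Int))
    answer

-- ===== PORT B =====
-- the two-pointer while-loop of Source B, as the obvious structural recursion on the two suffixes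
def mergeCommon : List Char → List Char → Int
  | [], _ => 0
  | _ :: _, [] => 0
  | a :: as, b :: bs =>
    if a < b then mergeCommon as (b :: bs)
    else if b < a then mergeCommon (a :: as) bs
    else 1 + mergeCommon as bs

-- Python's sorted(s) on a string compares 1-char strings, i.e. code points: key = identity on Char
def solution_alt (s1 : String) (s2 : String) : Int :=
  let a := PySem.List.sorted s1.toList (fun c => c) false
  let b := PySem.List.sorted s2.toList (fun c => c) false
  mergeCommon a b

-- ===== PRECONDITION & SPEC =====
def Spec_solution (s1 : String) (s2 : String) (out : Int) : Prop := out = solution_alt s1 s2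
instance (s1 : String) (s2 : String) (out : Int) : Decidable (Spec_solution s1 s2 out) := by unfold Spec_solution; infer_instance

-- ===== CLAIM (what is proved, stated in full; the proofs are below) =====
def Claim_equal_solution : Prop := ∀ (s1 : String) (s2 : String), Dom_solution s1 s2 → Spec_solution s1 s2 (solution s1 s2)

-- ===== LEMMAS AND PROOFS =====

-- Chars.count with a single-character needle is List.count
lemma count_go_single (c : Char) : ∀ (s : List Char) (fuel acc : Nat), s.length ≤ fuel →
    PySem.Chars.count.go [c] fuel s acc = acc + s.count c := by
  intro s
  induction s with
  | nil => intro fuel acc _; cases fuel <;> simp [PySem.Chars.count.go]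
  | cons h t ih =>
      intro fuel acc hle
      cases fuel with
      | zero => simp at hle
      | succ f =>
          by_cases hc : c = h
          · subst hc
            simp only [PySem.Chars.count.go, List.isPrefixOf, BEq.rfl, Bool.true_and,
              List.isPrefixOf_nil_left, if_true, List.length_singleton, List.drop_one,
              List.tail_cons]
            rw [ih f (acc + 1) (by simpa using hle)]
            simp
            omega
          · have hb : ([c].isPrefixOf (h :: t)) = false := by
              simp [List.isPrefixOf]
              exact fun hh => hc (by exact hh)
            simp only [PySem.Chars.count.go, hb]
            rw [ih f acc (by simpa using hle)]
            simp [List.count_cons]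
            intro hh
            exact absurd hh.symm hc

lemma chars_count_single (s : List Char) (c : Char) :
    PySem.Chars.count s [c] = s.count c := by
  have : ¬ ([c].isEmpty = true) := by simp
  simp only [PySem.Chars.count, List.isEmpty_cons, if_false, Bool.false_eq_true]
  simpa using count_go_single c s s.length 0 le_rfl

lemma singleton_infix_iff (c : Char) (l : List Char) : [c] <:+: l ↔ c ∈ l := by
  constructor
  · rintro ⟨s, t, rfl⟩; simp
  · intro h
    obtain ⟨s, t, rfl⟩ := List.append_of_mem h
    exact ⟨s, t, by simp⟩

-- the set-building fold is ofList of a filter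
lemma foldl_if_add (p : Char → Prop) [DecidablePred p] (xs : List Char) :
    ∀ st : PySem.Set Char,
      xs.foldl (fun st w => if p w then PySem.Set.add st w else st) st
        = (xs.filter (fun w => decide (p w))).foldl PySem.Set.add st := by
  induction xs with
  | nil => intro st; rfl
  | cons x xs ih =>
      intro st
      by_cases hx : p x <;> simp [hx, ih]

-- Multiset intersection helpers
lemma inter_cons_left_of_notMem {a : Char} {s t : Multiset Char} (h : a ∉ t) :
    (a ::ₘ s) ∩ t = s ∩ t := by
  ext k
  simp only [Multiset.count_inter, Multiset.count_cons]
  by_cases hk : k = a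
  · subst hk
    have : Multiset.count k t = 0 := Multiset.count_eq_zero_of_notMem h
    simp [this]
  · simp [hk]

lemma inter_cons_right_of_notMem {b : Char} {s t : Multiset Char} (h : b ∉ s) :
    s ∩ (b ::ₘ t) = s ∩ t := by
  ext k
  simp only [Multiset.count_inter, Multiset.count_cons]
  by_cases hk : k = b
  · subst hk
    have : Multiset.count k s = 0 := Multiset.count_eq_zero_of_notMem h
    simp [this]
  · simp [hk]

lemma inter_cons_cons (a : Char) (s t : Multiset Char) :
    (a ::ₘ s) ∩ (a ::ₘ t) = a ::ₘ (s ∩ t) := by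
  ext k
  simp only [Multiset.count_inter, Multiset.count_cons]
  by_cases hk : k = a <;> simp [hk]

-- the merge computes the cardinality of the multiset intersection (on sorted inputs)
lemma mergeCommon_eq_card : ∀ (x y : List Char),
    x.Pairwise (· ≤ ·) → y.Pairwise (· ≤ ·) →
    mergeCommon x y = (((x : Multiset Char) ∩ (y : Multiset Char)).card : Int) := by
  intro x y hx hy
  fun_induction mergeCommon x y with
  | case1 y => simp
  | case2 a as => simp
  | case3 a as b bs hab ih =>
      have ha : a ∉ (b :: bs) := by
        intro hmem
        rcases List.mem_cons.mp hmem with h | h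
        · exact absurd h (ne_of_lt hab)
        · exact absurd (List.rel_of_pairwise_cons hy h) (not_le.mpr hab)
      rw [ih (List.Pairwise.of_cons hx) hy]
      have : ((a :: as : List Char) : Multiset Char) ∩ ((b :: bs : List Char) : Multiset Char)
          = ((as : Multiset Char) ∩ ((b :: bs : List Char) : Multiset Char)) := by
        simpa using inter_cons_left_of_notMem (s := (as : Multiset Char))
          (t := ((b :: bs : List Char) : Multiset Char)) (by simpa using ha)
      rw [this]
  | case4 a as b bs hab hba ih =>
      have hb : b ∉ (a :: as) := by
        intro hmem
        rcases List.mem_cons.mp hmem with h | h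
        · exact absurd h (ne_of_lt hba)
        · exact absurd (List.rel_of_pairwise_cons hx h) (not_le.mpr hba)
      rw [ih hx (List.Pairwise.of_cons hy)]
      have : ((a :: as : List Char) : Multiset Char) ∩ ((b :: bs : List Char) : Multiset Char)
          = (((a :: as : List Char) : Multiset Char) ∩ (bs : Multiset Char)) := by
        simpa using inter_cons_right_of_notMem (s := ((a :: as : List Char) : Multiset Char))
          (t := (bs : Multiset Char)) (by simpa using hb)
      rw [this]
  | case5 a as b bs hab hba ih =>
      have heq : a = b := le_antisymm (not_lt.mp hba) (not_lt.mp hab)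
      subst heq
      rw [ih (List.Pairwise.of_cons hx) (List.Pairwise.of_cons hy)]
      have : ((a :: as : List Char) : Multiset Char) ∩ ((a :: bs : List Char) : Multiset Char)
          = a ::ₘ ((as : Multiset Char) ∩ (bs : Multiset Char)) := by
        simpa using inter_cons_cons a (as : Multiset Char) (bs : Multiset Char)
      rw [this]
      simp
      omega

-- A's sum over its set equals the cardinality of the multiset intersection
lemma sum_min_eq_card (x y : List Char) :
    ((PySem.Set.ofList (x.filter (fun w => decide (w ∈ y)))).map
        (fun c => (↑(min (x.count c) (y.count c)) : Int))).sum
      = (((x : Multiset Char) ∩ (y : Multiset Char)).card : Int) := by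
  set S : List Char := PySem.Set.ofList (x.filter (fun w => decide (w ∈ y))) with hS
  have hnodup : S.Nodup := PySem.Set.nodup_ofList _
  have hmem : ∀ c, c ∈ S ↔ (c ∈ x ∧ c ∈ y) := by
    intro c
    rw [hS, PySem.Set.mem_ofList]
    simp [List.mem_filter]
  have hfin : S.toFinset = ((x : Multiset Char) ∩ (y : Multiset Char)).toFinset := by
    ext c
    simp only [List.mem_toFinset, Multiset.mem_toFinset, Multiset.mem_inter, Multiset.mem_coe]
    exact hmem c
  have hsum := (List.sum_toFinset (f := fun c => (↑(min (x.count c) (y.count c)) : Int)) hnodup)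
  rw [← hsum, hfin]
  have hcard := Multiset.toFinset_sum_count_eq ((x : Multiset Char) ∩ (y : Multiset Char))
  rw [← hcard]
  push_cast
  apply Finset.sum_congr rfl
  intro c _
  simp

-- evaluating A's body on a chosen (smaller, larger) pair of lists
lemma solutionA_core (x y : List Char) :
    (x.foldl (fun st w => if (PySem.Chars.find y [w]) ≥ 0 then PySem.Set.add st w else st)
        (PySem.Set.empty : PySem.Set Char)).foldl
      (fun ans c => ans + (↑(min (PySem.Chars.count x [c]) (PySem.Chars.count y [c])) : Int)) 0
    = (((x : Multiset Char) ∩ (y : Multiset Char)).card : Int) := by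
  have hcond : ∀ w : Char, ((PySem.Chars.find y [w]) ≥ 0) = (w ∈ y) := by
    intro w
    simp only [ge_iff_le, eq_iff_iff]
    rw [PySem.Chars.find_nonneg_iff]
    exact singleton_infix_iff w y
  have h1 : (x.foldl (fun st w => if (PySem.Chars.find y [w]) ≥ 0 then PySem.Set.add st w else st)
        (PySem.Set.empty : PySem.Set Char))
      = PySem.Set.ofList (x.filter (fun w => decide (w ∈ y))) := by
    have := foldl_if_add (fun w => (PySem.Chars.find y [w]) ≥ 0) x (PySem.Set.empty : PySem.Set Char)
    rw [this, PySem.Set.ofList_eq_foldl]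
    congr 1
    apply List.filter_congr
    intro w _
    simp [hcond w]
  rw [h1, PySem.List.foldl_add]
  simp only [zero_add]
  have h2 : ∀ c : Char, (↑(min (PySem.Chars.count x [c]) (PySem.Chars.count y [c])) : Int)
      = (↑(min (x.count c) (y.count c)) : Int) := by
    intro c; rw [chars_count_single, chars_count_single]
  rw [List.map_congr_left (fun c _ => h2 c)]
  exact sum_min_eq_card x y

-- ===== VERDICT (by name: the statement is the Claim_ definition above) =====
theorem solution_spec : Claim_equal_solution := by
  intro s1 s2 _
  unfold Spec_solution solution solution_alt
  have hml : ∀ w : Char, (String.ofList [w]).toList = [w] := fun w => String.toList_ofList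
  have hB : mergeCommon (PySem.List.sorted s1.toList (fun c => c) false)
        (PySem.List.sorted s2.toList (fun c => c) false)
      = (((s1.toList : Multiset Char) ∩ (s2.toList : Multiset Char)).card : Int) := by
    rw [mergeCommon_eq_card _ _
      (by simpa using PySem.List.sorted_pairwise s1.toList (fun c => c))
      (by simpa using PySem.List.sorted_pairwise s2.toList (fun c => c))]
    congr 1
    rw [Multiset.coe_eq_coe.mpr (PySem.List.sorted_perm s1.toList (fun c => c) false),
        Multiset.coe_eq_coe.mpr (PySem.List.sorted_perm s2.toList (fun c => c) false)]
  simp only [PySem.Str.find, PySem.Str.count, hml]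
  rw [hB]
  split
  · exact solutionA_core s1.toList s2.toList
  · rw [Multiset.inter_comm]
    exact solutionA_core s2.toList s1.toList
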